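-- pv_equiv track=rewrite | github.com/pyro-ppl/numpyro | numpyro/infer/elbo.py | _identify_dense_edges
-- ===== SOURCE A (Python) =====
-- def _identify_dense_edges(trace):
--     succ = {}
--     for name, node in trace.items():
--         if node["type"] == "sample":
--             succ[name] = set()
--     for name, node in trace.items():
--         if node["type"] == "sample":
--             for past_name, past_node in trace.items():
--                 if past_node["type"] == "sample":
--                     if past_name == name:
--                         break
--                     # XXX: different from Pyro, we always add edge past_name -> name
--                     succ[past_name].add(name)
--     return succ
-- ===== SOURCE B (Python) =====
-- def _identify_dense_edges(trace):
--     names = [name for name, node in trace.items() if node["type"] == "sample"]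
--     succ = {}
--     for i, name in enumerate(names):
--         succ[name] = set(names[i + 1:])
--     return succ
-- ===== Notes on version B (the rewrite author's own statement) =====
-- stated objective: simpler
-- what changed: Instead of A's three nested rescans over the whole trace with a break, B collects the ordered sample names in one pass and then assigns each name the set of names in the suffix after it.
import Mathlib
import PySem

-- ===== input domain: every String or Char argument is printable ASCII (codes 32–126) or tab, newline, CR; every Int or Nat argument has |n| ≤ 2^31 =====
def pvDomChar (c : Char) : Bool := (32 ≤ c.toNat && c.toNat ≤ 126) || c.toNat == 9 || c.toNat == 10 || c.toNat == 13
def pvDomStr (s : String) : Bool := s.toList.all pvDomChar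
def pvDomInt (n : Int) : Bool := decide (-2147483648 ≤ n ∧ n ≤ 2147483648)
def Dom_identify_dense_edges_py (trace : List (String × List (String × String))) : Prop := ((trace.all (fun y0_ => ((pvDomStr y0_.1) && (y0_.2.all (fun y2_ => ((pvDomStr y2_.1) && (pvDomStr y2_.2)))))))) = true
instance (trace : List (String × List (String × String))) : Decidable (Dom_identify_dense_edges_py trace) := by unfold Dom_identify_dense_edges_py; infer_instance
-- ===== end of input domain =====

-- B replaces A's three nested rescans-with-break by one pass collecting the ordered sample names
-- and a suffix assignment per name (objective: simpler). Equivalence is on the return value.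

-- ===== PORT A =====
-- inner 'for past_name, past_node in trace.items(): … break' of A, with the break as a stop
def pvInnerA (succ : PySem.Dict String (PySem.Set String)) (name : String) :
    List (String × PySem.Dict String String) → PySem.Dict String (PySem.Set String)
  | [] => succ
  | (pn, pnode) :: rest =>
    if pnode.get? "type" = some "sample" then
      if pn = name then succ  -- break
      else pvInnerA (succ.modify pn [] (fun t => PySem.Set.add t name)) name rest
    else pvInnerA succ name rest

def identify_dense_edges_py (trace : List (String × List (String × String))) : List (String × List String) :=
  -- the Python receives nested dicts: decode the association lists into PySem.Dicts
  let td : PySem.Dict String (PySem.Dict String String) :=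
    PySem.Dict.ofList (trace.map (fun p => (p.1, PySem.Dict.ofList p.2)))
  -- first loop: succ[name] = set() for each sample node
  let succ0 := td.items.foldl
    (fun succ p => if p.2.get? "type" = some "sample" then succ.insert p.1 PySem.Set.empty else succ)
    PySem.Dict.empty
  -- second loop with the inner rescan
  let succ1 := td.items.foldl
    (fun succ p => if p.2.get? "type" = some "sample" then pvInnerA succ p.1 td.items else succ)
    succ0
  succ1.items

-- ===== PORT B =====
def identify_dense_edges_py_alt (trace : List (String × List (String × String))) : List (String × List String) :=
  let td : PySem.Dict String (PySem.Dict String String) :=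
    PySem.Dict.ofList (trace.map (fun p => (p.1, PySem.Dict.ofList p.2)))
  -- names = [name for name, node in trace.items() if node["type"] == "sample"]
  let names := td.items.filterMap (fun p => if p.2.get? "type" = some "sample" then some p.1 else none)
  -- for i, name in enumerate(names): succ[name] = set(names[i + 1:])
  let succ := (PySem.List.enumerate names 0).foldl
    (fun succ q => succ.insert q.2 (PySem.Set.ofList (PySem.List.slice names (some (q.1 + 1)) none)))
    PySem.Dict.empty
  succ.items

-- ===== PRECONDITION & SPEC =====
-- Pre_ excludes exactly the inputs on which the Python raises KeyError: a node of the (deduplicated)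
-- trace dict without a "type" key.
def Pre_identify_dense_edges_py (trace : List (String × List (String × String))) : Prop :=
  ((PySem.Dict.ofList (trace.map (fun p => (p.1, PySem.Dict.ofList p.2)))).items.all
    (fun p => (p.2.get? "type").isSome)) = true
instance (trace : List (String × List (String × String))) : Decidable (Pre_identify_dense_edges_py trace) := by unfold Pre_identify_dense_edges_py; infer_instance
def pvWitness_identify_dense_edges_py : (List (String × List (String × String))) :=
  [("a", [("type", "sample")]), ("b", [("type", "plate")]), ("c", [("type", "sample")])]
def Spec_identify_dense_edges_py (trace : List (String × List (String × String))) (out : List (String × List String)) : Prop := out = identify_dense_edges_py_alt trace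
instance (trace : List (String × List (String × String))) (out : List (String × List String)) : Decidable (Spec_identify_dense_edges_py trace out) := by unfold Spec_identify_dense_edges_py; infer_instance

-- ===== CLAIM (what is proved, stated in full; the proofs are below) =====
def Claim_equal_identify_dense_edges_py : Prop := ∀ (trace : List (String × List (String × String))), Dom_identify_dense_edges_py trace → Pre_identify_dense_edges_py trace → Spec_identify_dense_edges_py trace (identify_dense_edges_py trace)

-- ===== LEMMAS AND PROOFS =====

-- the common target: each name paired with the suffix of later names
def pvSuffix : List String → List (String × List String)
  | [] => []
  | n :: rest => (n, rest) :: pvSuffix rest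

theorem pv_keys_pvSuffix (l : List String) : (pvSuffix l).map Prod.fst = l := by
  induction l with
  | nil => rfl
  | cons n rest ih => simp [pvSuffix, ih]

theorem pv_mem_pvSuffix_val {l : List String} {p : String × List String}
    (hp : p ∈ pvSuffix l) {x : String} (hx : x ∈ p.2) : x ∈ l := by
  induction l with
  | nil => simp [pvSuffix] at hp
  | cons n rest ih =>
    simp only [pvSuffix, List.mem_cons] at hp
    rcases hp with h | h
    · subst h; exact List.mem_cons_of_mem _ hx
    · exact List.mem_cons_of_mem _ (ih h)

theorem pv_pvSuffix_append_singleton (l : List String) (m : String) :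
    pvSuffix (l ++ [m]) = (pvSuffix l).map (fun p => (p.1, p.2 ++ [m])) ++ [(m, [])] := by
  induction l with
  | nil => rfl
  | cons n rest ih => simp [pvSuffix, ih]

theorem pv_foldl_filter {α β : Type} (c : α → Prop) [DecidablePred c] (g : β → α → β)
    (l : List α) (s : β) :
    l.foldl (fun s p => if c p then g s p else s) s
      = (l.filter (fun p => decide (c p))).foldl g s := by
  induction l generalizing s with
  | nil => rfl
  | cons x xs ih => by_cases h : c x <;> simp [h, ih]

theorem pv_filterMap_if {α : Type} {κ : Type} (c : α → Prop) [DecidablePred c] (k : α → κ)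
    (l : List α) :
    l.filterMap (fun p => if c p then some (k p) else none)
      = (l.filter (fun p => decide (c p))).map k := by
  induction l with
  | nil => rfl
  | cons x xs ih => by_cases h : c x <;> simp [h, ih]

theorem pv_takeWhile_break (pre post : List String) (m : String) (h : m ∉ pre) :
    (pre ++ m :: post).takeWhile (fun pn => pn != m) = pre := by
  induction pre with
  | nil => simp [List.takeWhile]
  | cons x xs ih =>
    simp only [List.mem_cons, not_or] at h
    have hx : ¬ x = m := fun e => h.1 e.symm
    simp [List.takeWhile_cons, hx, ih h.2]

-- the inner loop with break is the fold of modify over the sample names before `name`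
theorem pv_innerA_eq (L : List (String × PySem.Dict String String)) (name : String)
    (s : PySem.Dict String (PySem.Set String)) :
    pvInnerA s name L =
      ((L.filterMap (fun p => if p.2.get? "type" = some "sample" then some p.1 else none)).takeWhile
          (fun pn => pn != name)).foldl
        (fun s pn => s.modify pn [] (fun t => PySem.Set.add t name)) s := by
  induction L generalizing s with
  | nil => rfl
  | cons x xs ih =>
    obtain ⟨pn, pnode⟩ := x
    by_cases hs : pnode.get? "type" = some "sample"
    · by_cases he : pn = name
      · subst he
        simp [pvInnerA, hs, List.filterMap_cons, List.takeWhile_cons]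
      · simp [pvInnerA, hs, he, bne, ih]
    · simp [pvInnerA, hs, ih]

-- modifying every key of the xs-segment appends m to its value
theorem pv_addAll (m : String) :
    ∀ (xs done rest : List (String × List String)),
    ((done ++ xs ++ rest).map Prod.fst).Nodup →
    (∀ p ∈ xs, m ∉ p.2) →
    (xs.map Prod.fst).foldl
        (fun (s : PySem.Dict String (PySem.Set String)) pn =>
          s.modify pn [] (fun t => PySem.Set.add t m))
        (PySem.Dict.mk (done ++ xs ++ rest))
      = PySem.Dict.mk (done ++ xs.map (fun p => (p.1, p.2 ++ [m])) ++ rest) := by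
  intro xs
  induction xs with
  | nil => intro done rest _ _; simp
  | cons x xs ih =>
    intro done rest hnd hm
    have hkeys : ((done ++ x :: xs ++ rest).map Prod.fst).Nodup := hnd
    have hx1 : x.1 ∉ done.map Prod.fst ∧ x.1 ∉ xs.map Prod.fst ∧ x.1 ∉ rest.map Prod.fst := by
      have hcount : ((done ++ x :: xs ++ rest).map Prod.fst).count x.1 ≤ 1 :=
        List.nodup_iff_count_le_one.mp hnd x.1
      simp only [List.map_append, List.map_cons, List.count_append, List.count_cons_self] at hcount
      refine ⟨fun hmem => ?_, fun hmem => ?_, fun hmem => ?_⟩ <;>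
        · have := List.count_pos_iff.mpr hmem
          omega
    have hmem : (x.1, x.2) ∈ (PySem.Dict.mk (done ++ x :: xs ++ rest)).items := by
      simp
    have hget : (PySem.Dict.mk (done ++ x :: xs ++ rest)).get? x.1 = some x.2 :=
      PySem.Dict.get?_of_mem_items _ hmem hkeys
    have hgetD : (PySem.Dict.mk (done ++ x :: xs ++ rest)).getD x.1 [] = x.2 :=
      PySem.Dict.getD_of_get?_eq_some _ _ hget
    have hcont : (PySem.Dict.mk (done ++ x :: xs ++ rest)).contains x.1 = true :=
      (PySem.Dict.contains_iff_mem_keys _ _).mpr (by simp [PySem.Dict.keys])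
    have hadd : PySem.Set.add x.2 m = x.2 ++ [m] := by
      simp [PySem.Set.add, PySem.Set.contains, hm x (by simp)]
    have hstep :
        (PySem.Dict.mk (done ++ x :: xs ++ rest)).modify x.1 [] (fun t => PySem.Set.add t m)
          = PySem.Dict.mk ((done ++ [(x.1, x.2 ++ [m])]) ++ xs ++ rest) := by
      have hdone : done.map (fun p => if p.1 == x.1 then (x.1, x.2 ++ [m]) else p) = done :=
        (List.map_congr_left (fun (p : String × List String) hp => by
          have hne : p.1 ≠ x.1 := fun e => hx1.1 (e ▸ List.mem_map_of_mem hp)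
          show _ = id p
          simp [hne])).trans (List.map_id _)
      have hxs : xs.map (fun p => if p.1 == x.1 then (x.1, x.2 ++ [m]) else p) = xs :=
        (List.map_congr_left (fun (p : String × List String) hp => by
          have hne : p.1 ≠ x.1 := fun e => hx1.2.1 (e ▸ List.mem_map_of_mem hp)
          show _ = id p
          simp [hne])).trans (List.map_id _)
      have hrest : rest.map (fun p => if p.1 == x.1 then (x.1, x.2 ++ [m]) else p) = rest :=
        (List.map_congr_left (fun (p : String × List String) hp => by
          have hne : p.1 ≠ x.1 := fun e => hx1.2.2 (e ▸ List.mem_map_of_mem hp)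
          show _ = id p
          simp [hne])).trans (List.map_id _)
      rw [PySem.Dict.modify, hgetD, hadd, PySem.Dict.insert, if_pos hcont]
      apply PySem.Dict.ext
      show (done ++ x :: xs ++ rest).map (fun p => if p.1 == x.1 then (x.1, x.2 ++ [m]) else p)
          = (done ++ [(x.1, x.2 ++ [m])]) ++ xs ++ rest
      simp only [List.map_append, List.map_cons, hdone, hxs, hrest, beq_self_eq_true, if_true]
      simp
    have hnd' : (((done ++ [(x.1, x.2 ++ [m])]) ++ xs ++ rest).map Prod.fst).Nodup := by
      have : ((done ++ [(x.1, x.2 ++ [m])]) ++ xs ++ rest).map Prod.fst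
          = (done ++ x :: xs ++ rest).map Prod.fst := by simp
      rw [this]; exact hkeys
    have hm' : ∀ p ∈ xs, m ∉ p.2 := fun p hp => hm p (List.mem_cons_of_mem _ hp)
    calc ((x :: xs).map Prod.fst).foldl
            (fun (s : PySem.Dict String (PySem.Set String)) pn =>
              s.modify pn [] (fun t => PySem.Set.add t m))
            (PySem.Dict.mk (done ++ x :: xs ++ rest))
        = (xs.map Prod.fst).foldl
            (fun (s : PySem.Dict String (PySem.Set String)) pn =>
              s.modify pn [] (fun t => PySem.Set.add t m))
            (PySem.Dict.mk ((done ++ [(x.1, x.2 ++ [m])]) ++ xs ++ rest)) := by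
          simp only [List.map_cons, List.foldl_cons, hstep]
      _ = PySem.Dict.mk ((done ++ [(x.1, x.2 ++ [m])]) ++ xs.map (fun p => (p.1, p.2 ++ [m])) ++ rest) :=
          ih _ _ hnd' hm'
      _ = PySem.Dict.mk (done ++ (x :: xs).map (fun p => (p.1, p.2 ++ [m])) ++ rest) := by
          simp

-- the outer fold over the remaining sample names turns the suffix picture one step at a time
theorem pv_main (ns : List String) (h : ns.Nodup) :
    ∀ (post pre : List String), pre ++ post = ns →
    post.foldl
        (fun s m =>
          ((ns.takeWhile (fun pn => pn != m)).foldl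
            (fun (s : PySem.Dict String (PySem.Set String)) pn =>
              s.modify pn [] (fun t => PySem.Set.add t m)) s))
        (PySem.Dict.mk (pvSuffix pre ++ post.map (fun n => (n, ([] : List String)))))
      = PySem.Dict.mk (pvSuffix ns) := by
  intro post
  induction post with
  | nil => intro pre hpre; simp at hpre; simp [hpre]
  | cons m post ih =>
    intro pre hpre
    have hmpre : m ∉ pre := by
      intro hmem
      have := h
      rw [← hpre] at this
      rcases (List.nodup_append.mp this) with ⟨_, hnd2, hdisj⟩
      exact hdisj m hmem m (by simp) rfl
    have htake : ns.takeWhile (fun pn => pn != m) = pre := by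
      rw [← hpre]; exact pv_takeWhile_break pre post m hmpre
    have hndns : (((pvSuffix pre) ++ ((m, ([] : List String)) :: post.map (fun n => (n, ([] : List String)))) ).map Prod.fst).Nodup := by
      have : ((pvSuffix pre ++ (m, ([] : List String)) :: post.map (fun n => (n, ([] : List String)))).map Prod.fst) = ns := by
        rw [← hpre]; simp [pv_keys_pvSuffix, List.map_map, Function.comp_def]
      rw [this]; exact h
    have hmvals : ∀ p ∈ pvSuffix pre, m ∉ p.2 := by
      intro p hp hmem
      exact hmpre (pv_mem_pvSuffix_val hp hmem)
    have hstep :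
        ((ns.takeWhile (fun pn => pn != m)).foldl
            (fun (s : PySem.Dict String (PySem.Set String)) pn =>
              s.modify pn [] (fun t => PySem.Set.add t m))
            (PySem.Dict.mk (pvSuffix pre ++ (m :: post).map (fun n => (n, ([] : List String))))))
          = PySem.Dict.mk (pvSuffix (pre ++ [m]) ++ post.map (fun n => (n, ([] : List String)))) := by
      have haa := pv_addAll m (pvSuffix pre) [] ((m, ([] : List String)) :: post.map (fun n => (n, ([] : List String)))) (by simpa using hndns) hmvals
      rw [pv_keys_pvSuffix] at haa
      simp only [List.nil_append] at haa
      rw [htake, List.map_cons, haa, pv_pvSuffix_append_singleton]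
      simp
    simp only [List.foldl_cons, hstep]
    exact ih (pre ++ [m]) (by simp [hpre])

-- port A computes pvSuffix of the sample-name list
theorem pv_A_eq (L : List (String × PySem.Dict String String))
    (hnd : (L.map Prod.fst).Nodup) :
    (L.foldl
        (fun succ p => if p.2.get? "type" = some "sample" then pvInnerA succ p.1 L else succ)
        (L.foldl
          (fun succ p => if p.2.get? "type" = some "sample" then succ.insert p.1 PySem.Set.empty else succ)
          PySem.Dict.empty)).items
      = pvSuffix (L.filterMap (fun p => if p.2.get? "type" = some "sample" then some p.1 else none)) := by
  have hfm := pv_filterMap_if (fun p : String × PySem.Dict String String => p.2.get? "type" = some "sample") Prod.fst L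
  have hns : (L.filterMap (fun p => if p.2.get? "type" = some "sample" then some p.1 else none)).Nodup := by
    rw [hfm]
    exact hnd.sublist (List.Sublist.map Prod.fst List.filter_sublist)
  have h1 : (L.foldl
      (fun succ p => if p.2.get? "type" = some "sample" then succ.insert p.1 PySem.Set.empty else succ)
      PySem.Dict.empty)
      = PySem.Dict.mk ((L.filterMap (fun p => if p.2.get? "type" = some "sample" then some p.1 else none)).map
          (fun n => (n, ([] : List String)))) := by
    rw [pv_foldl_filter]
    apply PySem.Dict.ext
    rw [PySem.Dict.items_foldl_insert_fresh _ Prod.fst (fun _ => PySem.Set.empty) _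
      (fun a _ => by simp [pysem]) (by rw [← hfm]; exact hns)]
    rw [hfm]
    simp [PySem.Dict.empty, PySem.Set.empty, List.map_map, Function.comp_def]
  rw [h1, pv_foldl_filter]
  have h2 : (L.filter (fun p => decide (p.2.get? "type" = some "sample"))).foldl
        (fun succ p => pvInnerA succ p.1 L)
        (PySem.Dict.mk ((L.filterMap (fun p => if p.2.get? "type" = some "sample" then some p.1 else none)).map
          (fun n => (n, ([] : List String)))))
      = (L.filterMap (fun p => if p.2.get? "type" = some "sample" then some p.1 else none)).foldl
        (fun succ n => pvInnerA succ n L)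
        (PySem.Dict.mk ((L.filterMap (fun p => if p.2.get? "type" = some "sample" then some p.1 else none)).map
          (fun n => (n, ([] : List String))))) := by
    rw [hfm, List.foldl_map]
  rw [h2]
  have h3 : (fun (succ : PySem.Dict String (PySem.Set String)) (n : String) => pvInnerA succ n L)
      = (fun succ n =>
          (((L.filterMap (fun p => if p.2.get? "type" = some "sample" then some p.1 else none)).takeWhile
              (fun pn => pn != n)).foldl
            (fun s pn => s.modify pn [] (fun t => PySem.Set.add t n)) succ)) := by
    funext succ n
    exact pv_innerA_eq L n succ
  rw [h3]
  have hmain := pv_main (L.filterMap (fun p => if p.2.get? "type" = some "sample" then some p.1 else none)) hns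
    (L.filterMap (fun p => if p.2.get? "type" = some "sample" then some p.1 else none)) [] rfl
  simp only [pvSuffix, List.nil_append] at hmain
  rw [hmain]

theorem pv_B_enum : ∀ (ns : List String) (a : Nat) (full : List String), full.Nodup →
    full.drop a = ns →
    (PySem.List.enumerate ns (a : Int)).map
        (fun q => (q.2, PySem.Set.ofList (PySem.List.slice full (some (q.1 + 1)) none)))
      = pvSuffix ns := by
  intro ns
  induction ns with
  | nil => intro a full _ _; simp [PySem.List.enumerate, pvSuffix]
  | cons n rest ih =>
    intro a full hnd hdrop
    rw [PySem.List.enumerate_cons, List.map_cons]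
    have hcast : ((a : Int) + 1) = ((a + 1 : Nat) : Int) := by push_cast; ring
    have hdrop' : full.drop (a + 1) = rest := by
      simpa [List.drop_drop] using congrArg (List.drop 1) hdrop
    have hrest : rest.Nodup := hdrop' ▸ hnd.sublist (List.drop_sublist (a + 1) full)
    show (n, PySem.Set.ofList (PySem.List.slice full (some ((a : Int) + 1)) none)) :: _ = _
    rw [pvSuffix]
    congr 1
    · rw [hcast, PySem.List.slice_from_natCast, hdrop',
        PySem.Set.ofList_eq_self_of_nodup rest hrest]
    · rw [hcast]
      exact ih (a + 1) full hnd hdrop'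

-- port B computes pvSuffix of the sample-name list
theorem pv_B_eq (ns : List String) (h : ns.Nodup) :
    ((PySem.List.enumerate ns 0).foldl
        (fun succ q => succ.insert q.2 (PySem.Set.ofList (PySem.List.slice ns (some (q.1 + 1)) none)))
        PySem.Dict.empty).items
      = pvSuffix ns := by
  have hkey := PySem.Dict.items_foldl_insert_fresh (PySem.List.enumerate ns 0)
    (fun q : Int × String => q.2)
    (fun q : Int × String => PySem.Set.ofList (PySem.List.slice ns (some (q.1 + 1)) none))
    PySem.Dict.empty
    (fun a _ => by simp [pysem]) (by rw [PySem.List.map_snd_enumerate]; exact h)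
  beta_reduce at hkey
  rw [hkey]
  have h0 : PySem.Dict.empty.items = ([] : List (String × List String)) := rfl
  rw [h0, List.nil_append]
  exact pv_B_enum ns 0 ns h (by simp)

-- ===== VERDICT (by name: the statement is the Claim_ definition above) =====
theorem identify_dense_edges_py_spec : Claim_equal_identify_dense_edges_py := by
  intro trace _ _
  unfold Spec_identify_dense_edges_py identify_dense_edges_py identify_dense_edges_py_alt
  dsimp only
  have hnd : ((PySem.Dict.ofList (trace.map (fun p => (p.1, PySem.Dict.ofList p.2)))).items.map
      Prod.fst).Nodup :=
    by simpa [PySem.Dict.keys] using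
      PySem.Dict.nodup_keys_ofList (trace.map (fun p => (p.1, PySem.Dict.ofList p.2)))
  have hns : (((PySem.Dict.ofList (trace.map (fun p => (p.1, PySem.Dict.ofList p.2)))).items).filterMap
      (fun p => if p.2.get? "type" = some "sample" then some p.1 else none)).Nodup := by
    rw [pv_filterMap_if (fun p : String × PySem.Dict String String => p.2.get? "type" = some "sample")
      Prod.fst]
    exact hnd.sublist (List.Sublist.map Prod.fst List.filter_sublist)
  rw [pv_A_eq _ hnd, pv_B_eq _ hns]
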